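-- pv_equiv track=rewrite | github.com/uddipan77/Analysis-of-Lightweight-Vision-Language-Models-for-Document-OCR-and-Structured-Output-Generation | UI_codes/phi_ui.py | dict_of_dicts_columns
-- ===== SOURCE A (Python) =====
-- def dict_of_dicts_columns(d):
--     if not isinstance(d, dict) or not d:
--         return None
--
--     first_inner = None
--     for v in d.values():
--         if not isinstance(v, dict):
--             return None
--         if first_inner is None:
--             first_inner = v
--
--     cols = list(first_inner.keys())
--     for v in d.values():
--         if set(v.keys()) != set(cols):
--             return None
--     return cols
-- ===== SOURCE B (Python) =====
-- def dict_of_dicts_columns(d):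
--     if not isinstance(d, dict) or not d:
--         return None
--     if any(not isinstance(v, dict) for v in d.values()):
--         return None
--     all_keys = [k for v in d.values() for k in v]
--     counts = {}
--     for k in all_keys:
--         counts[k] = counts.get(k, 0) + 1
--     n = len(d)
--     return list(next(iter(d.values())).keys()) if all(c == n for c in counts.values()) else None
-- ===== Notes on version B (the rewrite author's own statement) =====
-- stated objective: alternative
-- what changed: Replaces A's per-row set-equality comparisons against a reference column set by a global key-frequency counter over the concatenation of all inner keys: since inner-dict keys are unique per row, all key sets coincide iff every counted key's frequency equals len(d); no set is ever compared.
import Mathlib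
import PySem

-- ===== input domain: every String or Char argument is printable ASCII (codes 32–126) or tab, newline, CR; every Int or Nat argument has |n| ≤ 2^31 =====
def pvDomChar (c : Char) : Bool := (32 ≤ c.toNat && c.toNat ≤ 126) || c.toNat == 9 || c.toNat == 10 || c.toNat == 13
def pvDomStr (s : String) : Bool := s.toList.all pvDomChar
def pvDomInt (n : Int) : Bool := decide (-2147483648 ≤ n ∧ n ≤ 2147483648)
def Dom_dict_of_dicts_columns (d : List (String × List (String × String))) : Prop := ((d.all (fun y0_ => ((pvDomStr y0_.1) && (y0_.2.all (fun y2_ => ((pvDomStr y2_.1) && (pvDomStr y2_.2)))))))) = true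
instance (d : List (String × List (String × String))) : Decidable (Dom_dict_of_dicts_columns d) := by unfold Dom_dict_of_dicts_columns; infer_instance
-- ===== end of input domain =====

-- B replaces A's per-row set-equality check against a reference column set by a global
-- key-frequency counter: all key sets coincide iff every key's count equals len(d)
-- (objective: alternative algorithm, same cost).

-- ===== PORT A =====
-- list(v.keys()) for an insertion-ordered association list (first occurrences, in order)
def pvKeys (v : List (String × String)) : List String :=
  PySem.List.dedup (v.map Prod.fst)

-- A's second loop: 'for v in d.values(): if set(v.keys()) != set(cols): return None' then 'return cols'
def pvCheckCols : List (String × List (String × String)) → List String → Option (List String)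
  | [], cols => some cols
  | kv :: rest, cols =>
      if PySem.Set.equal (PySem.Set.ofList (pvKeys kv.2)) (PySem.Set.ofList cols) then
        pvCheckCols rest cols
      else none

def dict_of_dicts_columns (d : List (String × List (String × String))) : Option (List String) :=
  match d with
  | [] => none            -- 'not d' (isinstance(d, dict) is statically true under the type convention)
  | (_, v0) :: _ =>
      -- first loop: every value is a dict by typing; first_inner = first value
      let cols := pvKeys v0
      pvCheckCols d cols

-- ===== PORT B =====
def dict_of_dicts_columns_alt (d : List (String × List (String × String))) : Option (List String) :=
  match d with
  | [] => none            -- 'not d' (the isinstance guards are statically true under the type convention)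
  | (_, v0) :: _ =>
      -- all_keys = [k for v in d.values() for k in v]
      let allKeys := d.flatMap (fun kv => pvKeys kv.2)
      -- counts[k] = counts.get(k, 0) + 1 over all_keys
      let counts := allKeys.foldl (fun c k => c.insert k (c.getD k 0 + 1)) PySem.Dict.empty
      let n : Int := d.length
      if (PySem.Dict.values counts).all (fun c => c == n) then some (pvKeys v0) else none

-- ===== PRECONDITION & SPEC =====
def Spec_dict_of_dicts_columns (d : List (String × List (String × String))) (out : Option (List String)) : Prop := out = dict_of_dicts_columns_alt d
instance (d : List (String × List (String × String))) (out : Option (List String)) : Decidable (Spec_dict_of_dicts_columns d out) := by unfold Spec_dict_of_dicts_columns; infer_instance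

-- ===== CLAIM =====
def Claim_equal_dict_of_dicts_columns : Prop := ∀ (d : List (String × List (String × String))), Dom_dict_of_dicts_columns d → Spec_dict_of_dicts_columns d (dict_of_dicts_columns d)

-- ===== LEMMAS AND PROOFS =====

-- A's check loop returns 'some cols' iff every value's key set equals cols
lemma pvCheckCols_eq (l : List (String × List (String × String))) (cols : List String) :
    pvCheckCols l cols =
      if ∀ kv ∈ l, PySem.Set.equal (PySem.Set.ofList (pvKeys kv.2)) (PySem.Set.ofList cols) = true
      then some cols else none := by
  induction l with
  | nil => simp [pvCheckCols]
  | cons kv rest ih =>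
    simp only [pvCheckCols, ih, List.forall_mem_cons]
    by_cases h : PySem.Set.equal (PySem.Set.ofList (pvKeys kv.2)) (PySem.Set.ofList cols) = true
    · by_cases hp : ∀ kv ∈ rest,
          PySem.Set.equal (PySem.Set.ofList (pvKeys kv.2)) (PySem.Set.ofList cols) = true
      · rw [if_pos h, if_pos hp, if_pos ⟨h, hp⟩]
      · rw [if_pos h, if_neg hp, if_neg (fun hq => hp hq.2)]
    · rw [if_neg h, if_neg (fun hq => h hq.1)]

-- the count of a key in the flattened key list is the number of rows containing it
-- (inner key lists are duplicate-free, so each row contributes 0 or 1)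
lemma count_flatMap_keys (l : List (String × List (String × String))) (k : String) :
    (l.flatMap (fun kv => pvKeys kv.2)).count k
      = l.countP (fun kv => decide (k ∈ pvKeys kv.2)) := by
  induction l with
  | nil => simp
  | cons kv rest ih =>
    simp only [List.flatMap_cons, List.count_append, List.countP_cons, ih]
    by_cases h : k ∈ pvKeys kv.2
    · have h1 : (pvKeys kv.2).count k = 1 :=
        List.count_eq_one_of_mem (PySem.List.nodup_dedup _) h
      rw [h1]; simp [h]; omega
    · have h1 : (pvKeys kv.2).count k = 0 := List.count_eq_zero.mpr h
      rw [h1]; simp [h]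

-- all global key counts equal the row number  iff  every row's key set equals the first row's
lemma counts_iff (k0 : String) (v0 : List (String × String))
    (rest : List (String × List (String × String))) :
    (∀ k ∈ ((k0, v0) :: rest).flatMap (fun kv => pvKeys kv.2),
        (((k0, v0) :: rest).flatMap (fun kv => pvKeys kv.2)).count k = ((k0, v0) :: rest).length)
    ↔ (∀ kv ∈ (k0, v0) :: rest,
        PySem.Set.equal (PySem.Set.ofList (pvKeys kv.2)) (PySem.Set.ofList (pvKeys v0)) = true) := by
  constructor
  · intro H kv hkv
    rw [PySem.Set.equal_iff]
    intro x
    simp only [PySem.Set.mem_ofList]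
    have hall : ∀ k, k ∈ ((k0, v0) :: rest).flatMap (fun kv => pvKeys kv.2) →
        ∀ kv' ∈ (k0, v0) :: rest, x = k → k ∈ pvKeys kv'.2 := by
      intro k hk kv' hkv' _
      have := H k hk
      rw [count_flatMap_keys, List.countP_eq_length] at this
      exact of_decide_eq_true (this kv' hkv')
    constructor
    · intro hx
      exact hall x (List.mem_flatMap.mpr ⟨kv, hkv, hx⟩) (k0, v0) (List.mem_cons_self) rfl
    · intro hx
      exact hall x (List.mem_flatMap.mpr ⟨(k0, v0), List.mem_cons_self, hx⟩) kv hkv rfl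
  · intro H k hk
    obtain ⟨kv', hkv', hk'⟩ := List.mem_flatMap.mp hk
    have hk0 : k ∈ pvKeys v0 := by
      have := (PySem.Set.equal_iff _ _).mp (H kv' hkv') k
      simp only [PySem.Set.mem_ofList] at this
      exact this.mp hk'
    rw [count_flatMap_keys, List.countP_eq_length]
    intro kv hkv
    have := (PySem.Set.equal_iff _ _).mp (H kv hkv) k
    simp only [PySem.Set.mem_ofList] at this
    exact decide_eq_true (this.mpr hk0)

-- ===== VERDICT =====
theorem dict_of_dicts_columns_spec : Claim_equal_dict_of_dicts_columns := by
  intro d _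
  unfold Spec_dict_of_dicts_columns
  rcases d with _ | ⟨⟨k0, v0⟩, rest⟩
  · rfl
  · show pvCheckCols ((k0, v0) :: rest) (pvKeys v0) =
      dict_of_dicts_columns_alt ((k0, v0) :: rest)
    have hB : dict_of_dicts_columns_alt ((k0, v0) :: rest) =
        (if ((((k0, v0) :: rest).flatMap (fun kv => pvKeys kv.2)).foldl
              (fun c k => c.insert k (c.getD k 0 + 1)) PySem.Dict.empty).values.all
              (fun c => c == (((k0, v0) :: rest).length : Int))
         then some (pvKeys v0) else none) := rfl
    rw [hB, PySem.Dict.foldl_insert_getD_add_one_eq_counter, pvCheckCols_eq]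
    have hvals : (PySem.Dict.counter
          (((k0, v0) :: rest).flatMap (fun kv => pvKeys kv.2))).values
        = (PySem.Set.ofList (((k0, v0) :: rest).flatMap (fun kv => pvKeys kv.2))).map
            (fun k => ((((k0, v0) :: rest).flatMap (fun kv => pvKeys kv.2)).count k : Int)) := by
      show (PySem.Dict.counter _).items.map (·.2) = _
      rw [PySem.Dict.items_counter]
      simp [List.map_map, Function.comp]
    simp only [hvals, List.all_map, List.all_eq_true, Function.comp]
    have hiff :
        (∀ k ∈ PySem.Set.ofList (((k0, v0) :: rest).flatMap (fun kv => pvKeys kv.2)),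
            (((((k0, v0) :: rest).flatMap (fun kv => pvKeys kv.2)).count k : Int)
              == (((k0, v0) :: rest).length : Int)) = true)
        ↔ (∀ kv ∈ (k0, v0) :: rest,
            PySem.Set.equal (PySem.Set.ofList (pvKeys kv.2)) (PySem.Set.ofList (pvKeys v0)) = true) := by
      rw [← counts_iff k0 v0 rest]
      constructor
      · intro H k hk
        have hb := H k ((PySem.Set.mem_ofList _ _).mpr hk)
        exact_mod_cast beq_iff_eq.mp hb
      · intro H k hk
        have hb := H k ((PySem.Set.mem_ofList _ _).mp hk)
        exact beq_iff_eq.mpr (by exact_mod_cast hb)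
    by_cases hc : ∀ kv ∈ (k0, v0) :: rest,
        PySem.Set.equal (PySem.Set.ofList (pvKeys kv.2)) (PySem.Set.ofList (pvKeys v0)) = true
    · rw [if_pos hc, if_pos (hiff.mpr hc)]
    · rw [if_neg hc, if_neg (fun h => hc (hiff.mp h))]
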